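-- pv_equiv track=rewrite | github.com/AngeloChDev/djangoProject | team/utils.py | full_dict
-- ===== SOURCE A (Python) =====
-- def full_dict(winers:list, out:dict):
--       for winer in winers:
--             if winer not in out.keys():
--                   out[winer]={'w':0, 'p':0}
--             if len(winers)>1:
--                   out[winer]['p'] += 1
--             else:
--                   out[winer]['w'] += 1
--
--       return out
-- ===== SOURCE B (Python) =====
-- def full_dict(winers: list, out: dict):
--     # Builds a fresh dict (does not mutate `out`): copy out's entries, adding the
--     # tallied multiplicity to the hoisted field, then append the new winners
--     # (distinct, first-occurrence order) with freshly tallied entries.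
--     field = 'p' if len(winers) > 1 else 'w'
--     result = {}
--     for key, val in out.items():
--         c = winers.count(key)
--         if c:
--             val = dict(val)
--             val[field] = val[field] + c
--         result[key] = val
--     for w in dict.fromkeys(winers):
--         if w not in out:
--             d = {'w': 0, 'p': 0}
--             d[field] = winers.count(w)
--             result[w] = d
--     return result
-- ===== Notes on version B (the rewrite author's own statement) =====
-- stated objective: alternative
-- what changed: B replaces A's per-element update loop by two staged passes over different collections: it hoists the 'p'/'w' field choice, rebuilds the existing entries of out in one copy-and-update pass adding each key's tallied multiplicity (winers.count), then appends the new distinct winners (dict.fromkeys order) with freshly tallied entries; A instead touches the dict once per winers element. B builds a fresh dict and does not mutate out (return value is identical).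
-- outside the precondition, e.g. on full_dict(['ann'], {'ann': {'p': 0}}): A raises KeyError, B raises KeyError
import Mathlib
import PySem

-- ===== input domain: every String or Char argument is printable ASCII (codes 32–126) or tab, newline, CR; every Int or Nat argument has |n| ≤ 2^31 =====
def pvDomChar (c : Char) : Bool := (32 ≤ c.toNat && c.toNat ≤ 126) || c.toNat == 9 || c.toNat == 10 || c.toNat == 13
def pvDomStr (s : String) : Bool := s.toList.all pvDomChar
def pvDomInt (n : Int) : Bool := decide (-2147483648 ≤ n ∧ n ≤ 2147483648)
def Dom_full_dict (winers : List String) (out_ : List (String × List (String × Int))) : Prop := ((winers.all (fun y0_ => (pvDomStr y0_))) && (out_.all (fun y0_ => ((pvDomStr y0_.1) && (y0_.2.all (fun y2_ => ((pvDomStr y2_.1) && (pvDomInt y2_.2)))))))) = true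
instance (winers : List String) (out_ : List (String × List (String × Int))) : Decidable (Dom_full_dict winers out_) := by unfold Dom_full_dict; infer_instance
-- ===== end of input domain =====

-- B rebuilds the dict in two staged passes (copy-and-update the existing entries with tallied
-- multiplicities, then append the new distinct winners) instead of A's per-element update loop
-- (alternative decomposition; same cost). A mutates `out` in place in Python, B builds a fresh
-- dict; the equivalence proved here is about the RETURNED value, which is the same.

-- ===== PORT A =====
def full_dict (winers : List String) (out_ : List (String × List (String × Int))) : List (String × List (String × Int)) :=
  let out0 : PySem.Dict String (PySem.Dict String Int) :=
    PySem.Dict.mk (out_.map (fun p => (p.1, PySem.Dict.mk p.2)))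
  let res := winers.foldl (fun out winer =>
    let out := if out.contains winer = false
               then out.insert winer (PySem.Dict.mk [("w", 0), ("p", 0)])
               else out
    if winers.length > 1 then
      -- out[winer]['p'] += 1  (Pre_ guarantees the key is present, so the default is never used)
      out.modify winer PySem.Dict.empty (fun inner => inner.modify "p" 0 (· + 1))
    else
      out.modify winer PySem.Dict.empty (fun inner => inner.modify "w" 0 (· + 1))) out0
  res.items.map (fun p => (p.1, p.2.items))

-- ===== PORT B =====
def full_dict_alt (winers : List String) (out_ : List (String × List (String × Int))) : List (String × List (String × Int)) :=
  let field : String := if winers.length > 1 then "p" else "w"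
  let out0 : PySem.Dict String (PySem.Dict String Int) :=
    PySem.Dict.mk (out_.map (fun p => (p.1, PySem.Dict.mk p.2)))
  -- pass 1: copy out's entries, adding the tallied multiplicity to the hoisted field
  -- (val[field] + c: Pre_ guarantees the field is present, so the default is never used)
  let result := out0.items.foldl (fun r kv =>
      let c : Int := (winers.count kv.1 : Int)
      let v := if c ≠ 0 then kv.2.insert field (kv.2.getD field 0 + c) else kv.2
      r.insert kv.1 v) PySem.Dict.empty
  -- pass 2: append the new winners (distinct, first-occurrence order) with fresh tallies
  let result := (PySem.List.dedup winers).foldl (fun r w =>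
      if out0.contains w = false then
        let d : PySem.Dict String Int := PySem.Dict.mk [("w", 0), ("p", 0)]
        r.insert w (d.insert field ((winers.count w : Nat) : Int))
      else r) result
  result.items.map (fun p => (p.1, p.2.items))

-- ===== PRECONDITION & SPEC =====
-- Pre_ excludes (a) inputs on which Python A raises KeyError — some winner already present in
-- out_ whose value dict lacks the field ('p' if len(winers)>1 else 'w') being incremented —
-- and (b) out_ lists with duplicate keys, which do not represent any Python dict.
def Pre_full_dict (winers : List String) (out_ : List (String × List (String × Int))) : Prop :=
  (out_.map Prod.fst).Nodup ∧
  ∀ w ∈ winers, (match out_.find? (fun p => p.1 == w) with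
    | none => true
    | some p => (p.2.find? (fun q => q.1 == (if winers.length > 1 then "p" else "w"))).isSome) = true
instance (winers : List String) (out_ : List (String × List (String × Int))) : Decidable (Pre_full_dict winers out_) := by unfold Pre_full_dict; infer_instance

def pvWitness_full_dict : List String × (List (String × List (String × Int))) :=
  (["ann", "bob", "ann"], [("ann", [("w", 2), ("p", 1)]), ("cid", [("x", 5)])])

def Spec_full_dict (winers : List String) (out_ : List (String × List (String × Int))) (out : List (String × List (String × Int))) : Prop := out = full_dict_alt winers out_
instance (winers : List String) (out_ : List (String × List (String × Int))) (out : List (String × List (String × Int))) : Decidable (Spec_full_dict winers out_ out) := by unfold Spec_full_dict; infer_instance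

-- ===== CLAIM (what is proved, stated in full; the proofs are below) =====
def Claim_equal_full_dict : Prop := ∀ (winers : List String) (out_ : List (String × List (String × Int))), Dom_full_dict winers out_ → Pre_full_dict winers out_ → Spec_full_dict winers out_ (full_dict winers out_)

-- ===== LEMMAS AND PROOFS =====

-- A's per-element loop body, abstracted over the field and the increment
def pvStep (f : String) (d : PySem.Dict String (PySem.Dict String Int)) (w : String) (c : Int) :
    PySem.Dict String (PySem.Dict String Int) :=
  let d := if d.contains w = false then d.insert w (PySem.Dict.mk [("w", 0), ("p", 0)]) else d
  d.modify w PySem.Dict.empty (fun inner => inner.modify f 0 (· + c))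

theorem pv_contains_pvStep (f : String) (d : PySem.Dict String (PySem.Dict String Int))
    (w w' : String) (c : Int) :
    (pvStep f d w' c).contains w = (w == w' || d.contains w) := by
  unfold pvStep
  by_cases h : d.contains w' = false <;>
    simp [h, PySem.Dict.modify, PySem.Dict.contains_insert]

theorem pv_pvStep_pvStep_self (f : String) (d : PySem.Dict String (PySem.Dict String Int))
    (w : String) (a b : Int) :
    pvStep f (pvStep f d w a) w b = pvStep f d w (a + b) := by
  have hc : (pvStep f d w a).contains w = true := by
    rw [pv_contains_pvStep]; simp
  conv_lhs => rw [pvStep]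
  simp only [hc, Bool.true_eq_false]
  unfold pvStep
  by_cases h : d.contains w = false <;>
    simp [h, PySem.Dict.modify, PySem.Dict.getD_insert_self,
      PySem.Dict.insert_insert_self, add_assoc]

theorem pv_insert_comm {ν : Type} (d : PySem.Dict String ν) (w w' : String) (v v' : ν)
    (hne : w ≠ w') (hc : d.contains w = true) :
    (d.insert w' v').insert w v = (d.insert w v).insert w' v' := by
  have hcw' : ∀ (u : ν), (d.insert w u).contains w' = d.contains w' := by
    intro u; rw [PySem.Dict.contains_insert]; simp [Ne.symm hne]
  have hcw : ∀ (u : ν), (d.insert w' u).contains w = true := by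
    intro u; rw [PySem.Dict.contains_insert]; simp [hc]
  apply PySem.Dict.ext
  by_cases hc' : d.contains w' = true
  · rw [PySem.Dict.items_insert_of_contains _ _ (hcw v'),
        PySem.Dict.items_insert_of_contains _ _ hc',
        PySem.Dict.items_insert_of_contains _ _ (by rw [hcw' v]; exact hc'),
        PySem.Dict.items_insert_of_contains _ _ hc]
    simp only [List.map_map]
    apply List.map_congr_left
    intro p _
    by_cases h1 : p.1 = w <;> by_cases h2 : p.1 = w' <;> simp_all [Ne.symm hne]
  · have hc'f : d.contains w' = false := by simpa using hc'
    rw [PySem.Dict.items_insert_of_contains _ v (hcw v')]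
    rw [PySem.Dict.items_insert_of_not_contains _ v' hc'f]
    rw [PySem.Dict.items_insert_of_not_contains _ v' (by rw [hcw' v]; exact hc'f)]
    rw [PySem.Dict.items_insert_of_contains _ v hc]
    simp [Ne.symm hne]

theorem pv_pvStep_eq_insert_of_contains (f : String) (d : PySem.Dict String (PySem.Dict String Int))
    (w : String) (c : Int) (hc : d.contains w = true) :
    pvStep f d w c = d.insert w ((d.getD w PySem.Dict.empty).modify f 0 (· + c)) := by
  unfold pvStep
  simp [hc, PySem.Dict.modify]

theorem pv_pvStep_eq_insert_of_not_contains (f : String) (d : PySem.Dict String (PySem.Dict String Int))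
    (w : String) (c : Int) (hc : d.contains w = false) :
    pvStep f d w c
      = d.insert w ((PySem.Dict.mk [("w", 0), ("p", 0)] : PySem.Dict String Int).modify f 0 (· + c)) := by
  unfold pvStep
  simp [hc, PySem.Dict.modify, PySem.Dict.getD_insert_self, PySem.Dict.insert_insert_self]

theorem pv_pvStep_comm (f : String) (d : PySem.Dict String (PySem.Dict String Int))
    {w w' : String} (c c' : Int) (hne : w ≠ w') (hc : d.contains w = true) :
    pvStep f (pvStep f d w' c') w c = pvStep f (pvStep f d w c) w' c' := by
  set A := (d.getD w PySem.Dict.empty).modify f 0 (· + c) with hA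
  have hstep_w : pvStep f d w c = d.insert w A := pv_pvStep_eq_insert_of_contains f d w c hc
  by_cases hc' : d.contains w' = true
  · set B := (d.getD w' PySem.Dict.empty).modify f 0 (· + c') with hB
    have h1 : pvStep f d w' c' = d.insert w' B := pv_pvStep_eq_insert_of_contains f d w' c' hc'
    have h2 : pvStep f (d.insert w' B) w c = (d.insert w' B).insert w A := by
      rw [pv_pvStep_eq_insert_of_contains]
      · rw [PySem.Dict.getD_insert_of_ne _ _ _ hne]
      · rw [PySem.Dict.contains_insert]; simp [hc]
    have h3 : pvStep f (d.insert w A) w' c' = (d.insert w A).insert w' B := by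
      rw [pv_pvStep_eq_insert_of_contains]
      · rw [PySem.Dict.getD_insert_of_ne _ _ _ (Ne.symm hne)]
      · rw [PySem.Dict.contains_insert]; simp [hc']
    rw [h1, h2, hstep_w, h3]
    exact pv_insert_comm d w w' A B hne hc
  · have hc'f : d.contains w' = false := by simpa using hc'
    set B := (PySem.Dict.mk [("w", 0), ("p", 0)] : PySem.Dict String Int).modify f 0 (· + c') with hB
    have h1 : pvStep f d w' c' = d.insert w' B :=
      pv_pvStep_eq_insert_of_not_contains f d w' c' hc'f
    have h2 : pvStep f (d.insert w' B) w c = (d.insert w' B).insert w A := by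
      rw [pv_pvStep_eq_insert_of_contains]
      · rw [PySem.Dict.getD_insert_of_ne _ _ _ hne]
      · rw [PySem.Dict.contains_insert]; simp [hc]
    have h3 : pvStep f (d.insert w A) w' c' = (d.insert w A).insert w' B := by
      rw [pv_pvStep_eq_insert_of_not_contains]
      rw [PySem.Dict.contains_insert]; simp [hc'f, Ne.symm hne]
    rw [h1, h2, hstep_w, h3]
    exact pv_insert_comm d w w' A B hne hc

theorem pv_foldl_pvStep_swap (f : String) (w : String) (c : Int)
    (L : List (String × Int)) :
    ∀ (d : PySem.Dict String (PySem.Dict String Int)), (∀ p ∈ L, p.1 ≠ w) →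
      d.contains w = true →
      L.foldl (fun d p => pvStep f d p.1 p.2) (pvStep f d w c)
        = pvStep f (L.foldl (fun d p => pvStep f d p.1 p.2) d) w c := by
  induction L with
  | nil => intro d _ _; rfl
  | cons p L ih =>
    intro d hkeys hc
    simp only [List.foldl_cons]
    rw [← pv_pvStep_comm f d c p.2 (Ne.symm (hkeys p (by simp))) hc]
    exact ih _ (fun q hq => hkeys q (by simp [hq]))
      (by rw [pv_contains_pvStep]; simp [hc])

theorem pv_main (f : String) (ws : List String) :
    ∀ (d0 : PySem.Dict String (PySem.Dict String Int)),
      ws.foldl (fun d w => pvStep f d w 1) d0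
        = (PySem.Dict.counter ws).items.foldl (fun d p => pvStep f d p.1 p.2) d0 := by
  induction ws using List.reverseRecOn with
  | nil => intro d0; rfl
  | append_singleton ws x ih =>
    intro d0
    rw [List.foldl_append, List.foldl_cons, List.foldl_nil, ih,
        PySem.Dict.counter_append_singleton]
    show pvStep f _ x 1 = _
    rw [PySem.Dict.modify]
    by_cases hx : x ∈ ws
    · have hcont : (PySem.Dict.counter ws).contains x = true := by
        rw [PySem.Dict.contains_counter]; exact List.contains_iff_mem.mpr hx
      have hgetD : (PySem.Dict.counter ws).getD x 0 = (ws.count x : Int) :=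
        PySem.Dict.getD_counter ws x
      have hx' : x ∈ PySem.Set.ofList ws := (PySem.Set.mem_ofList ws x).mpr hx
      obtain ⟨s1, s2, hsplit⟩ := List.append_of_mem hx'
      have hnd := PySem.Set.nodup_ofList ws
      rw [hsplit] at hnd
      have hxs1 : x ∉ s1 := by
        intro h; exact (List.disjoint_of_nodup_append hnd) h (by simp)
      have hxs2 : x ∉ s2 := by
        have := (List.nodup_append.mp hnd).2.1
        simp [List.nodup_cons] at this; exact this.1
      have hitems : (PySem.Dict.counter ws).items
          = s1.map (fun k => (k, (ws.count k : Int))) ++ ((x, (ws.count x : Int)) ::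
            s2.map (fun k => (k, (ws.count k : Int)))) := by
        rw [PySem.Dict.items_counter, hsplit]; simp
      rw [PySem.Dict.items_insert_of_contains _ _ hcont, hitems, hgetD,
          List.map_append, List.map_cons]
      have hfix1 : (s1.map (fun k => (k, (ws.count k : Int)))).map
            (fun p => if (p.1 == x) = true then (x, (ws.count x : Int) + 1) else p)
          = s1.map (fun k => (k, (ws.count k : Int))) := by
        rw [List.map_map]
        apply List.map_congr_left
        intro k hk
        have : k ≠ x := fun h => hxs1 (h ▸ hk)
        simp [this]
      have hfix2 : (s2.map (fun k => (k, (ws.count k : Int)))).map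
            (fun p => if (p.1 == x) = true then (x, (ws.count x : Int) + 1) else p)
          = s2.map (fun k => (k, (ws.count k : Int))) := by
        rw [List.map_map]
        apply List.map_congr_left
        intro k hk
        have : k ≠ x := fun h => hxs2 (h ▸ hk)
        simp [this]
      rw [hfix1, hfix2]
      simp only [beq_self_eq_true, if_pos]
      rw [List.foldl_append, List.foldl_cons, List.foldl_append, List.foldl_cons]
      show pvStep f (List.foldl _ (pvStep f _ x _) _) x 1 = List.foldl _ (pvStep f _ x _) _
      rw [← pv_foldl_pvStep_swap f x 1 _ _
            (by intro p hp; obtain ⟨k, hk, rfl⟩ := List.mem_map.mp hp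
                exact fun h => hxs2 (h ▸ hk))
            (by rw [pv_contains_pvStep]; simp),
          pv_pvStep_pvStep_self]
    · have hcont : (PySem.Dict.counter ws).contains x = false := by
        rw [PySem.Dict.contains_counter]
        simp [hx]
      rw [PySem.Dict.items_insert_of_not_contains _ _ hcont, List.foldl_append,
          List.foldl_cons, List.foldl_nil, PySem.Dict.getD_counter,
          List.count_eq_zero_of_not_mem hx]
      norm_num

-- the fresh dict {'w':0,'p':0} yields 0 for any field
theorem pv_getD_d00 (f : String) :
    (PySem.Dict.mk [("w", (0:Int)), ("p", 0)]).getD f 0 = 0 := by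
  simp only [PySem.Dict.getD_eq_get?_getD, PySem.Dict.get?_mk_cons]
  by_cases h1 : ("w" == f) = true <;> by_cases h2 : ("p" == f) = true <;>
    simp [h1, h2, PySem.Dict.get?]

-- characterisation of a pvStep-fold over DISTINCT keys: existing entries get updated in place,
-- fresh keys are appended in order
theorem pv_split (f : String) (cnt : String → Int) (S : List String) :
    ∀ (d : PySem.Dict String (PySem.Dict String Int)), S.Nodup → d.keys.Nodup →
      (S.foldl (fun d k => pvStep f d k (cnt k)) d).items
        = d.items.map (fun kv =>
            if kv.1 ∈ S then (kv.1, kv.2.insert f (kv.2.getD f 0 + cnt kv.1)) else kv)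
          ++ (S.filter (fun k => ! d.contains k)).map
              (fun k => (k, (PySem.Dict.mk [("w", 0), ("p", 0)] : PySem.Dict String Int).insert f (cnt k))) := by
  induction S with
  | nil => intro d _ _; simp
  | cons k S ih =>
    intro d hnd hkeys
    have hkS : k ∉ S := (List.nodup_cons.mp hnd).1
    have hndS : S.Nodup := (List.nodup_cons.mp hnd).2
    simp only [List.foldl_cons]
    by_cases hc : d.contains k = true
    · -- existing key: updated in place
      set v' := (d.getD k PySem.Dict.empty).insert f
          ((d.getD k PySem.Dict.empty).getD f 0 + cnt k) with hv'
      have hstep : pvStep f d k (cnt k) = d.insert k v' := by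
        rw [pv_pvStep_eq_insert_of_contains f d k (cnt k) hc]; rfl
      rw [hstep, ih _ hndS (PySem.Dict.nodup_keys_insert d k v' hkeys)]
      have hcong : ∀ x ∈ S, ((d.insert k v').contains x = false) = (d.contains x = false) := by
        intro x hx
        have hxk : x ≠ k := fun h => hkS (h ▸ hx)
        rw [PySem.Dict.contains_insert]
        simp [hxk]
      have hfilter : S.filter (fun x => ! (d.insert k v').contains x)
          = S.filter (fun x => ! d.contains x) := by
        apply List.filter_congr
        intro x hx
        have hxk : x ≠ k := fun h => hkS (h ▸ hx)
        rw [PySem.Dict.contains_insert]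
        simp [hxk]
      rw [hfilter, PySem.Dict.items_insert_of_contains _ _ hc, List.map_map]
      have hfk : S.filter (fun x => ! d.contains x) = (k :: S).filter (fun x => ! d.contains x) := by
        simp [hc]
      rw [hfk]
      congr 1
      apply List.map_congr_left
      intro kv hkv
      by_cases hk1 : kv.1 = k
      · have hget : d.getD k PySem.Dict.empty = kv.2 := by
          rw [← hk1]
          exact PySem.Dict.getD_of_mem_items d (by simpa using hkv) hkeys PySem.Dict.empty
        simp only [Function.comp_apply, hk1, beq_self_eq_true, if_pos, hkS,
          List.mem_cons, true_or]
        simp [hv', hget]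
      · have : (kv.1 == k) = false := by simpa using hk1
        simp only [Function.comp_apply, this, Bool.false_eq_true, if_false]
        by_cases hmem : kv.1 ∈ S <;> simp [hmem, hk1]
    · -- fresh key: appended
      have hcf : d.contains k = false := by simpa using hc
      set newv := (PySem.Dict.mk [("w", 0), ("p", 0)] : PySem.Dict String Int).insert f (cnt k)
        with hnewv
      have hstep : pvStep f d k (cnt k) = d.insert k newv := by
        rw [pv_pvStep_eq_insert_of_not_contains f d k (cnt k) hcf, PySem.Dict.modify,
            pv_getD_d00, zero_add]
      rw [hstep, ih _ hndS (PySem.Dict.nodup_keys_insert d k newv hkeys)]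
      rw [PySem.Dict.items_insert_of_not_contains _ _ hcf]
      have hfilter : S.filter (fun x => ! (d.insert k newv).contains x)
          = S.filter (fun x => ! d.contains x) := by
        apply List.filter_congr
        intro x hx
        have hxk : x ≠ k := fun h => hkS (h ▸ hx)
        rw [PySem.Dict.contains_insert]
        simp [hxk]
      rw [hfilter, List.map_append]
      have hsing : ([(k, newv)] : List (String × PySem.Dict String Int)).map (fun kv =>
          if kv.1 ∈ S then (kv.1, kv.2.insert f (kv.2.getD f 0 + cnt kv.1)) else kv)
          = [(k, newv)] := by simp [hkS]
      have hmapd : ∀ kv ∈ d.items,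
          (if kv.1 ∈ S then (kv.1, kv.2.insert f (kv.2.getD f 0 + cnt kv.1)) else kv)
            = (if kv.1 ∈ k :: S then (kv.1, kv.2.insert f (kv.2.getD f 0 + cnt kv.1)) else kv) := by
        intro kv hkv
        have hk1 : kv.1 ≠ k := by
          intro h
          have : d.contains kv.1 = true := by
            rw [PySem.Dict.contains_iff_mem_keys]
            exact PySem.Dict.mem_keys_of_mem_items d hkv
          rw [h, hcf] at this; cases this
        simp [List.mem_cons, hk1]
      rw [hsing, List.map_congr_left hmapd]
      have hfk : (k :: S).filter (fun x => ! d.contains x)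
          = k :: S.filter (fun x => ! d.contains x) := by
        simp [hcf]
      rw [hfk, List.map_cons]
      simp [List.append_assoc, hnewv]

-- B's pass 1 (copy-and-update over out0.items) written as a map
theorem pv_phase1_items (f : String) (winers : List String)
    (out0 : PySem.Dict String (PySem.Dict String Int)) (h : out0.keys.Nodup) :
    (out0.items.foldl (fun r kv =>
        r.insert kv.1 (if ((winers.count kv.1 : Nat) : Int) ≠ 0
          then kv.2.insert f (kv.2.getD f 0 + ((winers.count kv.1 : Nat) : Int)) else kv.2))
      PySem.Dict.empty).items
    = out0.items.map (fun kv => (kv.1, if ((winers.count kv.1 : Nat) : Int) ≠ 0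
        then kv.2.insert f (kv.2.getD f 0 + ((winers.count kv.1 : Nat) : Int)) else kv.2)) := by
  rw [PySem.Dict.items_foldl_insert_fresh out0.items (fun kv => kv.1) _ PySem.Dict.empty
      (by intro a _; simp) (by simpa [PySem.Dict.keys] using h)]
  simp [PySem.Dict.empty]

-- B's pass 2 over distinct keys that are fresh for the accumulator appends in order
theorem pv_phase2 (f : String) (cnt : String → Int)
    (out0 : PySem.Dict String (PySem.Dict String Int)) (S : List String) :
    ∀ (r0 : PySem.Dict String (PySem.Dict String Int)), S.Nodup →
      (∀ w ∈ S, out0.contains w = false → r0.contains w = false) →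
      (S.foldl (fun r w => if out0.contains w = false
          then r.insert w ((PySem.Dict.mk [("w", 0), ("p", 0)] : PySem.Dict String Int).insert f (cnt w))
          else r) r0).items
        = r0.items ++ (S.filter (fun w => ! out0.contains w)).map
            (fun w => (w, (PySem.Dict.mk [("w", 0), ("p", 0)] : PySem.Dict String Int).insert f (cnt w))) := by
  induction S with
  | nil => intro r0 _ _; simp
  | cons w S ih =>
    intro r0 hnd hfresh
    have hwS : w ∉ S := (List.nodup_cons.mp hnd).1
    have hndS : S.Nodup := (List.nodup_cons.mp hnd).2
    simp only [List.foldl_cons]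
    by_cases hc : out0.contains w = false
    · have hr0 : r0.contains w = false := hfresh w (by simp) hc
      rw [if_pos hc, ih _ hndS (by
        intro x hx hox
        rw [PySem.Dict.contains_insert]
        have hxw : x ≠ w := fun h => hwS (h ▸ hx)
        simp [hxw, hfresh x (by simp [hx]) hox]),
        PySem.Dict.items_insert_of_not_contains _ _ hr0]
      simp [hc]
    · rw [if_neg hc, ih _ hndS (fun x hx hox => hfresh x (by simp [hx]) hox)]
      have hct : out0.contains w = true := by simpa using hc
      simp [hct]

-- ===== VERDICT (by name: the statement is the Claim_ definition above) =====
theorem full_dict_spec : Claim_equal_full_dict := by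
  intro winers out_ _ hpre
  obtain ⟨hnd, -⟩ := hpre
  unfold Spec_full_dict full_dict full_dict_alt
  set f : String := if winers.length > 1 then "p" else "w" with hf
  set out0 : PySem.Dict String (PySem.Dict String Int) :=
    PySem.Dict.mk (out_.map (fun p => (p.1, PySem.Dict.mk p.2))) with hout0
  have hkeys : out0.keys.Nodup := by
    have : out0.keys = out_.map Prod.fst := by
      simp [hout0, PySem.Dict.keys, List.map_map]
    rw [this]; exact hnd
  -- A's loop body is pvStep
  have hlam : (fun (out : PySem.Dict String (PySem.Dict String Int)) (winer : String) =>
      let out := if out.contains winer = false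
                 then out.insert winer (PySem.Dict.mk [("w", 0), ("p", 0)])
                 else out
      if winers.length > 1 then
        out.modify winer PySem.Dict.empty (fun inner => inner.modify "p" 0 (· + 1))
      else
        out.modify winer PySem.Dict.empty (fun inner => inner.modify "w" 0 (· + 1)))
      = (fun d w => pvStep f d w 1) := by
    funext d w
    by_cases h : winers.length > 1 <;> simp [pvStep, hf, h]
  rw [hlam]
  show (winers.foldl (fun d w => pvStep f d w 1) out0).items.map (fun p => (p.1, p.2.items))
      = ((PySem.Set.ofList winers).foldl (fun r w => if out0.contains w = false
            then r.insert w ((PySem.Dict.mk [("w", 0), ("p", 0)] : PySem.Dict String Int).insert f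
              ((winers.count w : Nat) : Int))
            else r)
          (out0.items.foldl (fun r kv =>
              r.insert kv.1 (if ((winers.count kv.1 : Nat) : Int) ≠ 0
                then kv.2.insert f (kv.2.getD f 0 + ((winers.count kv.1 : Nat) : Int)) else kv.2))
            PySem.Dict.empty)).items.map (fun p => (p.1, p.2.items))
  rw [pv_main, PySem.Dict.items_counter, List.foldl_map]
  have hA := pv_split f (fun k => ((winers.count k : Nat) : Int)) (PySem.Set.ofList winers)
    out0 (PySem.Set.nodup_ofList winers) hkeys
  have hB2 := pv_phase2 f (fun k => ((winers.count k : Nat) : Int)) out0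
    (PySem.Set.ofList winers)
    (out0.items.foldl (fun r kv =>
        r.insert kv.1 (if ((winers.count kv.1 : Nat) : Int) ≠ 0
          then kv.2.insert f (kv.2.getD f 0 + ((winers.count kv.1 : Nat) : Int)) else kv.2))
      PySem.Dict.empty)
    (PySem.Set.nodup_ofList winers)
    (by
      intro w _ hw
      have hkeq : (out0.items.foldl (fun r kv =>
          r.insert kv.1 (if ((winers.count kv.1 : Nat) : Int) ≠ 0
            then kv.2.insert f (kv.2.getD f 0 + ((winers.count kv.1 : Nat) : Int)) else kv.2))
          PySem.Dict.empty).keys = out0.keys := by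
        rw [PySem.Dict.keys,
          PySem.Dict.items_foldl_insert_fresh out0.items (fun kv => kv.1) _ PySem.Dict.empty
            (by intro a _; simp) (by simpa [PySem.Dict.keys] using hkeys)]
        simp [PySem.Dict.empty, PySem.Dict.keys, List.map_map]
      rw [PySem.Dict.contains_eq_decide_mem_keys, hkeq,
        ← PySem.Dict.contains_eq_decide_mem_keys]
      exact hw)
  have hfirst : out0.items.map (fun kv =>
        if kv.1 ∈ PySem.Set.ofList winers
        then (kv.1, kv.2.insert f (kv.2.getD f 0 + ((winers.count kv.1 : Nat) : Int))) else kv)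
      = out0.items.map (fun kv => (kv.1, if ((winers.count kv.1 : Nat) : Int) ≠ 0
        then kv.2.insert f (kv.2.getD f 0 + ((winers.count kv.1 : Nat) : Int)) else kv.2)) := by
    apply List.map_congr_left
    intro kv _
    by_cases hm : kv.1 ∈ winers
    · have h1 : kv.1 ∈ PySem.Set.ofList winers := (PySem.Set.mem_ofList winers kv.1).mpr hm
      have h2 : ((winers.count kv.1 : Nat) : Int) ≠ 0 := by
        have := List.count_pos_iff.mpr hm
        omega
      simp only [h1, if_true]
      rw [if_pos h2]
    · have h1 : kv.1 ∉ PySem.Set.ofList winers := fun h => hm ((PySem.Set.mem_ofList winers kv.1).mp h)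
      have h2 : winers.count kv.1 = 0 := List.count_eq_zero_of_not_mem hm
      simp [h1, h2]
  have hitems : (List.foldl (fun d k => pvStep f d k ((winers.count k : Nat) : Int))
        out0 (PySem.Set.ofList winers)).items
      = (List.foldl (fun r w => if out0.contains w = false
            then r.insert w ((PySem.Dict.mk [("w", 0), ("p", 0)] : PySem.Dict String Int).insert f
              ((winers.count w : Nat) : Int))
            else r)
          (out0.items.foldl (fun r kv =>
              r.insert kv.1 (if ((winers.count kv.1 : Nat) : Int) ≠ 0
                then kv.2.insert f (kv.2.getD f 0 + ((winers.count kv.1 : Nat) : Int)) else kv.2))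
            PySem.Dict.empty)
          (PySem.Set.ofList winers)).items := by
    rw [hA, hB2, pv_phase1_items f winers out0 hkeys, hfirst]
  exact congrArg (List.map (fun p => (p.1, p.2.items))) hitems
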